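-- pv_equiv track=rewrite | github.com/wells-wood-research/prometheozyme | src/utils/workflow.py | is_complete_motif
-- ===== SOURCE A (Python) =====
-- def get_row_molecule_columns(row):
--     mol_to_cols = {}
--     for c, mol in enumerate(row):
--         mol_to_cols.setdefault(mol, set()).add(c)
--     return mol_to_cols
--
-- def is_complete_motif(motif, rows):
--     motif_dict = dict(motif)
--     for row in rows:
--         mol_to_cols = get_row_molecule_columns(row)
--         for mol in set(motif_dict.values()):
--             cols_in_motif = {c for c, v in motif_dict.items() if v == mol}
--             cols_in_row = mol_to_cols.get(mol, set())
--             if cols_in_motif and cols_in_motif != cols_in_row: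
--                 return False
--     return True
-- ===== SOURCE B (Python) =====
-- def is_complete_motif(motif, rows):
--     motif_dict = dict(motif)
--     motif_values = set(motif_dict.values())
--
--     def row_ok(row):
--         return (all(c in range(len(row)) and row[c] == v
--                     for c, v in motif_dict.items())
--                 and all(mol not in motif_values or motif_dict.get(c) == mol
--                         for c, mol in enumerate(row)))
--
--     return all(row_ok(row) for row in rows)
-- ===== Notes on version B (the rewrite author's own statement) =====
-- stated objective: simpler
-- what changed: Replaces A's per-molecule column-set construction and set comparison with a direct two-part per-row check: every motif assignment (column in range, value matches) plus every row occurrence of a motif value claimed by the motif dict.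
import Mathlib
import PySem

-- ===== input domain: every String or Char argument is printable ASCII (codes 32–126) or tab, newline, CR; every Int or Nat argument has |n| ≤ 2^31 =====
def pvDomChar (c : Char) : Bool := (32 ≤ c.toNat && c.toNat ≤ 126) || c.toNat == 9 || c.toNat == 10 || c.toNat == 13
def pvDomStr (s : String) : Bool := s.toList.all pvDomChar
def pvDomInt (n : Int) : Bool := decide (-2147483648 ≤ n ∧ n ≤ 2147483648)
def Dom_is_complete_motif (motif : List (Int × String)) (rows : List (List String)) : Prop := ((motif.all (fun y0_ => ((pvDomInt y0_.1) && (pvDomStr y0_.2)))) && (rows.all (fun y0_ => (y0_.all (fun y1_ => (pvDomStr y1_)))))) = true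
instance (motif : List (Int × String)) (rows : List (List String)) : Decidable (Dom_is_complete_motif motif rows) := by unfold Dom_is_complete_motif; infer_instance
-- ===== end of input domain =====

-- B replaces A's per-molecule column-set construction/comparison by two direct linear
-- per-row scans (check each motif assignment, then each row occurrence of a motif value);
-- objective: simpler.

-- ===== PORT A =====
def get_row_molecule_columns (row : List String) : PySem.Dict String (PySem.Set Int) :=
  (PySem.List.enumerate row).foldl
    (fun d p => d.modify p.2 PySem.Set.empty (fun s => PySem.Set.add s p.1))
    PySem.Dict.empty

def pvACheckRow (md : PySem.Dict Int String) (row : List String) : Bool :=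
  let m2c := get_row_molecule_columns row
  !((PySem.Set.ofList md.values).any (fun mol =>
      let cols_in_motif : PySem.Set Int :=
        PySem.Set.ofList ((md.items.filter (fun p => p.2 == mol)).map (·.1))
      let cols_in_row : PySem.Set Int := m2c.getD mol PySem.Set.empty
      !cols_in_motif.isEmpty && !(PySem.Set.equal cols_in_motif cols_in_row)))

def pvALoop (md : PySem.Dict Int String) : List (List String) → Bool
  | [] => true
  | row :: rest => if pvACheckRow md row then pvALoop md rest else false

def is_complete_motif (motif : List (Int × String)) (rows : List (List String)) : Bool :=
  pvALoop (PySem.Dict.ofList motif) rows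

-- ===== PORT B =====
def pvBRowOk (md : PySem.Dict Int String) (mvals : PySem.Set String) (row : List String) : Bool :=
  (md.items.all (fun p =>
      (decide (0 ≤ p.1) && decide (p.1 < (row.length : Int))) &&
      (PySem.List.pyGet? row p.1 == some p.2))) &&
  ((PySem.List.enumerate row).all (fun q =>
      !(mvals.contains q.2) || (md.get? q.1 == some q.2)))

def is_complete_motif_alt (motif : List (Int × String)) (rows : List (List String)) : Bool :=
  let md := PySem.Dict.ofList motif
  let mvals := PySem.Set.ofList md.values
  rows.all (pvBRowOk md mvals)

-- ===== PRECONDITION & SPEC =====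
def Spec_is_complete_motif (motif : List (Int × String)) (rows : List (List String)) (out : Bool) : Prop := out = is_complete_motif_alt motif rows
instance (motif : List (Int × String)) (rows : List (List String)) (out : Bool) : Decidable (Spec_is_complete_motif motif rows out) := by unfold Spec_is_complete_motif; infer_instance

-- ===== CLAIM (what is proved, stated in full; the proofs are below) =====
def Claim_equal_is_complete_motif : Prop := ∀ (motif : List (Int × String)) (rows : List (List String)), Dom_is_complete_motif motif rows → Spec_is_complete_motif motif rows (is_complete_motif motif rows)

-- ===== LEMMAS AND PROOFS =====


def InRow (row : List String) (c : Int) (v : String) : Prop :=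
  ∃ p ∈ PySem.List.enumerate row, p.2 = v ∧ p.1 = c

lemma mem_m2c_aux (l : List (Int × String)) (d : PySem.Dict String (PySem.Set Int))
    (mol : String) (x : Int) :
    x ∈ (l.foldl (fun d p => d.modify p.2 PySem.Set.empty (fun s => PySem.Set.add s p.1)) d).getD mol PySem.Set.empty ↔
    x ∈ d.getD mol PySem.Set.empty ∨ ∃ p ∈ l, p.2 = mol ∧ p.1 = x := by
  induction l generalizing d with
  | nil => simp
  | cons p rest ih =>
      simp only [List.foldl_cons, ih, PySem.Dict.getD_modify]
      by_cases h : mol = p.2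
      · subst h
        simp only [if_pos trivial, PySem.Set.mem_add, List.mem_cons]
        constructor
        · rintro (⟨hm | rfl⟩ | ⟨q, hq, h2, h1⟩)
          · exact Or.inl hm
          · exact Or.inr ⟨p, Or.inl rfl, rfl, rfl⟩
          · exact Or.inr ⟨q, Or.inr hq, h2, h1⟩
        · rintro (hm | ⟨q, (rfl | hq), h2, h1⟩)
          · exact Or.inl (Or.inl hm)
          · exact Or.inl (Or.inr h1.symm)
          · exact Or.inr ⟨q, hq, h2, h1⟩
      · rw [if_neg h]
        simp only [List.mem_cons]
        constructor
        · rintro (hm | ⟨q, hq, h2, h1⟩)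
          · exact Or.inl hm
          · exact Or.inr ⟨q, Or.inr hq, h2, h1⟩
        · rintro (hm | ⟨q, (rfl | hq), h2, h1⟩)
          · exact Or.inl hm
          · exact absurd h2 (by exact fun hh => h hh.symm)
          · exact Or.inr ⟨q, hq, h2, h1⟩

lemma b1_iff (row : List String) (c : Int) (v : String) :
    ((decide (0 ≤ c) && decide (c < (row.length : Int))) &&
      (PySem.List.pyGet? row c == some v)) = true ↔ InRow row c v := by
  unfold InRow
  simp only [Bool.and_eq_true, decide_eq_true_eq, beq_iff_eq, PySem.List.mem_enumerate_iff]
  constructor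
  · rintro ⟨⟨h0, hl⟩, hget⟩
    obtain ⟨n, rfl⟩ : ∃ n : Nat, c = (n : Int) := ⟨c.toNat, (Int.toNat_of_nonneg h0).symm⟩
    have hn : n < row.length := by exact_mod_cast hl
    refine ⟨(n, row[n]), ⟨n, hn, by simp⟩, ?_, rfl⟩
    simpa [PySem.List.pyGet?_natCast, List.getElem?_eq_getElem hn] using hget
  · rintro ⟨p, ⟨k, hk, rfl⟩, rfl, rfl⟩
    simp [hk]

lemma mem_cm_iff (md : PySem.Dict Int String) (hnd : md.keys.Nodup) (mol : String) (x : Int) :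
    (x ∈ PySem.Set.ofList ((md.items.filter (fun p => p.2 == mol)).map (·.1))) ↔
      md.get? x = some mol := by
  rw [PySem.Set.mem_ofList, PySem.Dict.get?_eq_some_iff_mem_items md x mol hnd]
  simp only [List.mem_map, List.mem_filter, beq_iff_eq]
  constructor
  · rintro ⟨p, ⟨hp, h2⟩, h1⟩
    have : p = (x, mol) := by obtain ⟨a, b⟩ := p; simp_all
    exact this ▸ hp
  · intro h
    exact ⟨(x, mol), ⟨h, rfl⟩, rfl⟩

lemma mem_cr_iff (row : List String) (mol : String) (x : Int) :
    x ∈ (get_row_molecule_columns row).getD mol PySem.Set.empty ↔ InRow row x mol := by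
  unfold get_row_molecule_columns InRow
  rw [mem_m2c_aux]
  simp [PySem.Dict.getD_empty]

lemma mem_values_iff (md : PySem.Dict Int String) (hnd : md.keys.Nodup) (mol : String) :
    mol ∈ md.values ↔ ∃ c, md.get? c = some mol := by
  simp only [PySem.Dict.values, List.mem_map]
  constructor
  · rintro ⟨p, hp, rfl⟩
    exact ⟨p.1, (PySem.Dict.get?_eq_some_iff_mem_items md p.1 p.2 hnd).2 hp⟩
  · rintro ⟨c, hc⟩
    exact ⟨(c, mol), (PySem.Dict.get?_eq_some_iff_mem_items md c mol hnd).1 hc, rfl⟩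

theorem pvA_iff (md : PySem.Dict Int String) (hnd : md.keys.Nodup) (row : List String) :
    pvACheckRow md row = true ↔
      ∀ mol ∈ md.values, ∀ x : Int, (md.get? x = some mol ↔ InRow row x mol) := by
  unfold pvACheckRow
  simp only [Bool.not_eq_true', List.any_eq_false, PySem.Set.mem_ofList]
  constructor
  · intro h mol hmol x
    have hni := h mol hmol
    have hne : (PySem.Set.ofList ((md.items.filter (fun p => p.2 == mol)).map (·.1))).isEmpty = false := by
      obtain ⟨c, hc⟩ := (mem_values_iff md hnd mol).1 hmol
      have hmem := (mem_cm_iff md hnd mol c).2 hc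
      rw [Bool.eq_false_iff]
      intro he
      rw [List.isEmpty_iff] at he
      rw [he] at hmem
      exact absurd hmem (List.not_mem_nil)
    rw [hne] at hni
    simp only [Bool.not_false, Bool.true_and, Bool.not_eq_true', Bool.not_eq_false] at hni
    have := (PySem.Set.equal_iff _ _).1 hni x
    rwa [mem_cm_iff md hnd mol x, mem_cr_iff row mol x] at this
  · intro h mol hmol
    simp
    intro _ x
    rw [← PySem.Dict.get?_eq_some_iff_mem_items md x mol hnd]
    exact (h mol hmol x).trans ((mem_cr_iff row mol x).symm)

theorem pvB_iff (md : PySem.Dict Int String) (row : List String) :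
    pvBRowOk md (PySem.Set.ofList md.values) row = true ↔
      (∀ p ∈ md.items, InRow row p.1 p.2) ∧
      (∀ q ∈ PySem.List.enumerate row, q.2 ∈ md.values → md.get? q.1 = some q.2) := by
  unfold pvBRowOk
  rw [Bool.and_eq_true]
  simp only [List.all_eq_true]
  constructor
  · rintro ⟨h1, h2⟩
    refine ⟨fun p hp => (b1_iff row p.1 p.2).1 (h1 p hp), fun q hq hv => ?_⟩
    have hor := h2 q hq
    have hct : (PySem.Set.ofList md.values).contains q.2 = true := by
      rw [PySem.Set.contains_iff, PySem.Set.mem_ofList]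
      exact hv
    rw [hct] at hor
    simpa using hor
  · rintro ⟨h1, h2⟩
    refine ⟨fun p hp => (b1_iff row p.1 p.2).2 (h1 p hp), fun q hq => ?_⟩
    by_cases hv : q.2 ∈ md.values
    · have := h2 q hq hv
      simp [this]
    · have hct : (PySem.Set.ofList md.values).contains q.2 = false := by
        rw [Bool.eq_false_iff]
        intro hc
        rw [PySem.Set.contains_iff, PySem.Set.mem_ofList] at hc
        exact hv hc
      rw [hct]
      simp

theorem pv_row_eq (md : PySem.Dict Int String) (hnd : md.keys.Nodup) (row : List String) :
    pvACheckRow md row = pvBRowOk md (PySem.Set.ofList md.values) row := by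
  rw [Bool.eq_iff_iff, pvA_iff md hnd row, pvB_iff md row]
  constructor
  · intro h
    constructor
    · intro p hp
      have hget : md.get? p.1 = some p.2 :=
        (PySem.Dict.get?_eq_some_iff_mem_items md p.1 p.2 hnd).2 (by simpa using hp)
      have hv : p.2 ∈ md.values := (mem_values_iff md hnd p.2).2 ⟨p.1, hget⟩
      exact (h p.2 hv p.1).1 hget
    · intro q hq hv
      exact (h q.2 hv q.1).2 ⟨q, hq, rfl, rfl⟩
  · rintro ⟨h1, h2⟩ mol hmol x
    constructor
    · intro hget
      have hp := (PySem.Dict.get?_eq_some_iff_mem_items md x mol hnd).1 hget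
      exact h1 (x, mol) hp
    · rintro ⟨q, hq, hm, hx⟩
      have := h2 q hq (hm ▸ hmol)
      rw [hx, hm] at this
      exact this

theorem pv_loop_eq (md : PySem.Dict Int String) (hnd : md.keys.Nodup) (rows : List (List String)) :
    pvALoop md rows = rows.all (pvBRowOk md (PySem.Set.ofList md.values)) := by
  induction rows with
  | nil => rfl
  | cons r rs ih =>
      simp only [pvALoop, List.all_cons, pv_row_eq _ hnd r]
      cases pvBRowOk md (PySem.Set.ofList md.values) r with
      | true => simpa using ih
      | false => simp

-- ===== VERDICT (by name: the statement is the Claim_ definition above) =====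
theorem is_complete_motif_spec : Claim_equal_is_complete_motif := by
  intro motif rows _
  unfold Spec_is_complete_motif is_complete_motif is_complete_motif_alt
  exact pv_loop_eq _ (PySem.Dict.nodup_keys_ofList motif) rows
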